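-- pv_equiv track=rewrite | github.com/Lncn/adventofcode | 2023/1/solution.py | convert_first_num_to_digit
-- ===== SOURCE A (Python) =====
-- def convert_first_num_to_digit(line, tmap):
--     x = ""
--     for i in range(len(line)):
--         # If we encounter a digit before a written out word, no need to convert
--         if line[i].isdigit():
--             return line
--
--         x += line[i]
--
--         for key in tmap:
--             offset = x.find(key)
--             if offset >= 0:
--                 return line[:offset] + tmap[key] + line[offset + len(key) :]
--
--     return line
-- ===== SOURCE B (Python) =====
-- def convert_first_num_to_digit(line, tmap):
--     if not line:
--         return line
--     best = None  # (visible_at, start, key, digit) for the key whose first occurrence completes earliest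
--     for key, digit in tmap.items():
--         o = line.find(key)
--         if o >= 0:
--             v = max(o + len(key) - 1, 0)
--             if best is None or v < best[0]:
--                 best = (v, o, key, digit)
--                 if v == 0:
--                     break  # v >= 0 always and ties keep the earlier key: nothing can beat 0
--     if best is None or any(c.isdigit() for c in line[:best[0] + 1]):
--         return line
--     v, o, key, digit = best
--     return line[:o] + digit + line[o + len(key):]
-- ===== Notes on version B (the rewrite author's own statement) =====
-- stated objective: alternative
-- what changed: Instead of growing a prefix string and re-running a substring search over it for every key at every position, B runs one line.find per key to get its first occurrence, picks the key whose occurrence becomes fully visible first (earliest key on ties, breaking early on an unbeatable index-0 candidate), and checks for an earlier digit only once, on the prefix up to that point.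
import Mathlib
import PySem

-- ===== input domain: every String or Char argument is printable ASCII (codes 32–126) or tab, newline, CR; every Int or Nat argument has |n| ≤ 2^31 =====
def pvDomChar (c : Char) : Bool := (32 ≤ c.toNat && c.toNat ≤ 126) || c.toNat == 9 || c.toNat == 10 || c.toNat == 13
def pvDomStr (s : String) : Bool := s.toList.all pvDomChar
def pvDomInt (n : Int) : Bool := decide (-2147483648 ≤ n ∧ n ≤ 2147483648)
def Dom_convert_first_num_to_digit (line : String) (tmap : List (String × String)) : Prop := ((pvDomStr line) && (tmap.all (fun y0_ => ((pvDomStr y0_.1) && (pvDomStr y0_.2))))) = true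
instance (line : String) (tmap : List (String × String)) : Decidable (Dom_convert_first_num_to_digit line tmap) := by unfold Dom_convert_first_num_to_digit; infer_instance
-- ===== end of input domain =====

-- B replaces A's grow-prefix-and-research scan by one find per key (earliest fully-visible
-- first occurrence wins, early break on an unbeatable candidate; objective: alternative).


-- ===== PORT A =====
-- inner 'for key in tmap' loop: offset = x.find(key); on a hit, splice tmap[key] into line
def pvAInner (lineC x : List Char) : List (String × String) → Option (List Char)
  | [] => none
  | (k, v) :: rest =>
    let offset := PySem.Chars.find x k.toList
    if 0 ≤ offset then
      some (PySem.List.slice lineC none (some offset) ++ v.toList ++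
            PySem.List.slice lineC (some (offset + (k.toList.length : Int))) none)
    else pvAInner lineC x rest

-- outer 'for i in range(len(line))' loop; x is the growing prefix, the list argument the rest
def pvAOuter (lineC : List Char) (tmap : List (String × String)) : List Char → List Char → List Char
  | _, [] => lineC
  | x, c :: rest =>
    if PySem.Chars.isdigit c then lineC
    else
      match pvAInner lineC (x ++ [c]) tmap with
      | some r => r
      | none => pvAOuter lineC tmap (x ++ [c]) rest

def convert_first_num_to_digit (line : String) (tmap : List (String × String)) : String :=
  String.ofList (pvAOuter line.toList tmap [] line.toList)

-- ===== PORT B =====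
-- Source B's 'best is None or v < best[0]'
def pvBGuard (best : Option (Int × Int × String × String)) (v : Int) : Bool :=
  match best with | none => true | some b => decide (v < b.1)

-- Source B's 'for key, digit in tmap.items()' loop: o = line.find(key); keep the candidate whose
-- first occurrence is fully visible first (v), earliest key on ties; break when v hits 0
def pvBBest (lineC : List Char) : List (String × String) → Option (Int × Int × String × String) → Option (Int × Int × String × String)
  | [], best => best
  | (k, dgt) :: rest, best =>
    let o := PySem.Chars.find lineC k.toList
    if 0 ≤ o then
      let v := max (o + (k.toList.length : Int) - 1) 0
      if pvBGuard best v then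
        if v = 0 then some (v, o, k, dgt)
        else pvBBest lineC rest (some (v, o, k, dgt))
      else pvBBest lineC rest best
    else pvBBest lineC rest best

def convert_first_num_to_digit_alt (line : String) (tmap : List (String × String)) : String :=
  if line.toList = [] then line
  else
    match pvBBest line.toList tmap none with
    | none => line
    | some (v, o, k, dgt) =>
      -- 'any(c.isdigit() for c in line[:v + 1])'
      if (PySem.List.slice line.toList none (some (v + 1))).any PySem.Chars.isdigit then line
      else String.ofList (PySem.List.slice line.toList none (some o) ++ dgt.toList ++
             PySem.List.slice line.toList (some (o + (k.toList.length : Int))) none)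

-- ===== PRECONDITION & SPEC =====
def Spec_convert_first_num_to_digit (line : String) (tmap : List (String × String)) (out : String) : Prop := out = convert_first_num_to_digit_alt line tmap
instance (line : String) (tmap : List (String × String)) (out : String) : Decidable (Spec_convert_first_num_to_digit line tmap out) := by unfold Spec_convert_first_num_to_digit; infer_instance

-- ===== CLAIM (what is proved, stated in full; the proofs are below) =====
def Claim_equal_convert_first_num_to_digit : Prop := ∀ (line : String) (tmap : List (String × String)), Dom_convert_first_num_to_digit line tmap → Spec_convert_first_num_to_digit line tmap (convert_first_num_to_digit line tmap)

-- ===== LEMMAS AND PROOFS =====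

-- o(k) = first occurrence of key k in the line, v(k) = index where it is fully visible
abbrev pvO (lineC : List Char) (k : String) : Int := PySem.Chars.find lineC k.toList
abbrev pvV (lineC : List Char) (k : String) : Int := max (pvO lineC k + (k.toList.length : Int) - 1) 0

theorem pv_bguard_of (best : Option (Int × Int × String × String)) (v : Int)
    (h : ∀ b, best = some b → v < b.1) : pvBGuard best v = true := by
  cases best with
  | none => rfl
  | some b => simpa [pvBGuard] using h b rfl

theorem pv_prefix_append_left {kL L M : List Char} (h : kL <+: L ++ M)
    (hlen : kL.length ≤ L.length) : kL <+: L := by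
  have h' := List.prefix_iff_eq_take.mp h
  rw [List.take_append_of_le_length hlen] at h'
  exact List.prefix_iff_eq_take.mpr h'

-- converse of find_spec: an occurrence with none earlier IS the find value
theorem pv_find_eq (s kL : List Char) (j : Nat) (hj : kL <+: s.drop j)
    (hmin : ∀ i < j, ¬ kL <+: s.drop i) : PySem.Chars.find s kL = (j : Int) := by
  have h0 : 0 ≤ PySem.Chars.find s kL :=
    (PySem.Chars.find_nonneg_iff _ _).mpr (hj.isInfix.trans (List.drop_suffix j s).isInfix)
  obtain ⟨hocc, hm⟩ := PySem.Chars.find_spec h0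
  have hfj : (PySem.Chars.find s kL).toNat = j := by
    rcases Nat.lt_trichotomy (PySem.Chars.find s kL).toNat j with h | h | h
    · exact absurd hocc (hmin _ h)
    · exact h
    · exact absurd hj (hm j h)
  omega

-- a found occurrence fits inside the string
theorem pv_occ_le (s kL : List Char) (h : 0 ≤ PySem.Chars.find s kL) :
    (PySem.Chars.find s kL).toNat + kL.length ≤ s.length := by
  obtain ⟨hocc, -⟩ := PySem.Chars.find_spec h
  have h1 := hocc.length_le
  have h2 : PySem.Chars.find s kL ≤ (s.length : Int) := PySem.Chars.find_le_length s kL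
  rw [List.length_drop] at h1
  omega

-- if A's inner check fires on the prefix x ++ [c], the prefix occurrence IS the global
-- first occurrence and it fits inside the first x.length + 1 characters
theorem pv_fire_of (x rest' : List Char) (c : Char) (kL : List Char)
    (h2 : 0 ≤ PySem.Chars.find (x ++ [c]) kL) :
    PySem.Chars.find (x ++ c :: rest') kL = PySem.Chars.find (x ++ [c]) kL ∧
    (PySem.Chars.find (x ++ [c]) kL).toNat + kL.length ≤ x.length + 1 := by
  obtain ⟨hocc, hm⟩ := PySem.Chars.find_spec h2
  have hfit := pv_occ_le (x ++ [c]) kL h2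
  rw [List.length_append, List.length_cons, List.length_nil] at hfit
  set f := (PySem.Chars.find (x ++ [c]) kL).toNat with hf
  have hlen1 : (x ++ [c]).length = x.length + 1 := by
    rw [List.length_append, List.length_cons, List.length_nil]
  have hassoc : x ++ c :: rest' = (x ++ [c]) ++ rest' := by simp
  have heq : PySem.Chars.find (x ++ c :: rest') kL = (f : Int) := by
    apply pv_find_eq
    · rw [hassoc, List.drop_append_of_le_length (by omega)]
      exact hocc.trans (List.prefix_append _ rest')
    · intro i hi hpre
      apply hm i hi
      rw [hassoc, List.drop_append_of_le_length (by omega)] at hpre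
      exact pv_prefix_append_left hpre (by rw [List.length_drop, hlen1]; omega)
  refine ⟨?_, hfit⟩
  rw [heq]; omega

-- conversely, a global first occurrence that fits in the prefix makes A's check fire
theorem pv_fire_to (x rest' : List Char) (c : Char) (kL : List Char)
    (h : 0 ≤ PySem.Chars.find (x ++ c :: rest') kL)
    (hfit : (PySem.Chars.find (x ++ c :: rest') kL).toNat + kL.length ≤ x.length + 1) :
    0 ≤ PySem.Chars.find (x ++ [c]) kL := by
  obtain ⟨hocc, -⟩ := PySem.Chars.find_spec h
  set f := (PySem.Chars.find (x ++ c :: rest') kL).toNat with hf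
  have hlen1 : (x ++ [c]).length = x.length + 1 := by
    rw [List.length_append, List.length_cons, List.length_nil]
  have hassoc : x ++ c :: rest' = (x ++ [c]) ++ rest' := by simp
  rw [hassoc, List.drop_append_of_le_length (by omega)] at hocc
  have hpre : kL <+: List.drop f (x ++ [c]) :=
    pv_prefix_append_left hocc (by rw [List.length_drop, hlen1]; omega)
  exact (PySem.Chars.find_nonneg_iff _ _).mpr
    (hpre.isInfix.trans (List.drop_suffix f (x ++ [c])).isInfix)

-- if A's inner loop found nothing, no key is found at all: the fold returns its accumulator
theorem pv_bb_nofound (lineC : List Char) (tm : List (String × String))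
    (acc : Option (Int × Int × String × String))
    (h : ∀ kv ∈ tm, ¬ 0 ≤ pvO lineC kv.1) : pvBBest lineC tm acc = acc := by
  induction tm generalizing acc with
  | nil => rfl
  | cons kv rest ih =>
    obtain ⟨k, dg⟩ := kv
    simp only [pvBBest]
    rw [if_neg (h (k, dg) List.mem_cons_self)]
    exact ih _ (fun kv h' => h kv (List.mem_cons_of_mem _ h'))

-- every candidate has v ≥ i, so the result (if any) has v ≥ i
theorem pv_bb_ge (lineC : List Char) (i : Int) (tm : List (String × String))
    (acc : Option (Int × Int × String × String))
    (hv : ∀ kv ∈ tm, 0 ≤ pvO lineC kv.1 → i ≤ pvV lineC kv.1)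
    (hacc : ∀ b, acc = some b → i ≤ b.1) :
    ∀ b, pvBBest lineC tm acc = some b → i ≤ b.1 := by
  induction tm generalizing acc with
  | nil => exact hacc
  | cons kv rest ih =>
    obtain ⟨k, dg⟩ := kv
    have hvrest := fun kv h' => hv kv (List.mem_cons_of_mem (k, dg) h')
    simp only [pvBBest]
    by_cases ho : 0 ≤ pvO lineC k
    · rw [if_pos ho]
      have hvk : i ≤ pvV lineC k := hv (k, dg) List.mem_cons_self ho
      simp only [pvO, pvV] at hvk
      by_cases hg : pvBGuard acc (max (PySem.Chars.find lineC k.toList + (k.toList.length : Int) - 1) 0) = true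
      · rw [if_pos hg]
        by_cases hz : max (PySem.Chars.find lineC k.toList + (k.toList.length : Int) - 1) 0 = 0
        · rw [if_pos hz]
          intro b hb; cases hb; simpa using hvk
        · rw [if_neg hz]
          exact ih _ hvrest (by intro b hb; cases hb; simpa using hvk)
      · rw [if_neg hg]
        exact ih _ hvrest hacc
    · rw [if_neg ho]
      exact ih _ hvrest hacc

-- a stored best with minimal possible v survives the rest of the fold
theorem pv_bb_keep (lineC : List Char) (i : Int) (tm : List (String × String))
    (b : Int × Int × String × String) (hbv : b.1 = i)
    (hv : ∀ kv ∈ tm, 0 ≤ pvO lineC kv.1 → i ≤ pvV lineC kv.1) :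
    pvBBest lineC tm (some b) = some b := by
  induction tm with
  | nil => rfl
  | cons kv rest ih =>
    obtain ⟨k, dg⟩ := kv
    simp only [pvBBest]
    by_cases ho : 0 ≤ pvO lineC k
    · rw [if_pos ho]
      have hvk := hv (k, dg) List.mem_cons_self ho
      simp only [pvO, pvV] at hvk
      rw [if_neg (by
        simp only [pvBGuard, decide_eq_true_eq]
        rw [hbv]
        omega)]
      exact ih (fun kv h' => hv kv (List.mem_cons_of_mem _ h'))
    · rw [if_neg ho]
      exact ih (fun kv h' => hv kv (List.mem_cons_of_mem _ h'))

-- the heart: at step i (= x.length), assuming every found key has v ≥ i, either no key is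
-- visible yet (and then every found key has v ≥ i + 1), or A's inner loop returns the splice
-- of the first key with v = i — which is exactly the candidate B's fold selects
theorem pv_match (x rest' : List Char) (c : Char) (tm : List (String × String))
    (hv : ∀ kv ∈ tm, 0 ≤ pvO (x ++ c :: rest') kv.1 →
      (x.length : Int) ≤ pvV (x ++ c :: rest') kv.1) :
    (pvAInner (x ++ c :: rest') (x ++ [c]) tm = none ∧
      ∀ kv ∈ tm, 0 ≤ pvO (x ++ c :: rest') kv.1 →
        (x.length : Int) + 1 ≤ pvV (x ++ c :: rest') kv.1) ∨
    (∃ k dgt, (k, dgt) ∈ tm ∧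
      pvAInner (x ++ c :: rest') (x ++ [c]) tm =
        some (PySem.List.slice (x ++ c :: rest') none (some (pvO (x ++ c :: rest') k)) ++
              dgt.toList ++
              PySem.List.slice (x ++ c :: rest')
                (some (pvO (x ++ c :: rest') k + (k.toList.length : Int))) none) ∧
      ∀ acc, (∀ b, acc = some b → (x.length : Int) < b.1) →
        pvBBest (x ++ c :: rest') tm acc =
          some (((x.length : Int), pvO (x ++ c :: rest') k, k, dgt))) := by
  induction tm with
  | nil => exact Or.inl ⟨rfl, by intro kv h; cases h⟩
  | cons kv rest ih =>
    obtain ⟨k, dgt⟩ := kv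
    have hvrest : ∀ kv ∈ rest, 0 ≤ pvO (x ++ c :: rest') kv.1 →
        (x.length : Int) ≤ pvV (x ++ c :: rest') kv.1 :=
      fun kv h' => hv kv (List.mem_cons_of_mem _ h')
    by_cases h2 : 0 ≤ PySem.Chars.find (x ++ [c]) k.toList
    · -- the head key fires
      right
      obtain ⟨ho, hfit⟩ := pv_fire_of x rest' c k.toList h2
      have honn : 0 ≤ pvO (x ++ c :: rest') k := by
        simp only [pvO]; rw [ho]; exact h2
      have hvk : pvV (x ++ c :: rest') k = (x.length : Int) := by
        have hge : (x.length : Int) ≤ pvV (x ++ c :: rest') k :=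
          hv (k, dgt) List.mem_cons_self honn
        have honn' : 0 ≤ PySem.Chars.find (x ++ c :: rest') k.toList := honn
        have hfit' : (PySem.Chars.find (x ++ c :: rest') k.toList).toNat + k.toList.length ≤
            x.length + 1 := by rw [ho]; exact hfit
        simp only [pvV, pvO] at hge ⊢
        omega
      refine ⟨k, dgt, List.mem_cons_self, ?_, ?_⟩
      · simp only [pvAInner]
        rw [if_pos h2]
        rw [(ho.symm : PySem.Chars.find (x ++ [c]) k.toList = pvO (x ++ c :: rest') k)]
      · intro acc hacc
        simp only [pvBBest]
        rw [if_pos honn]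
        have hvk' : max (pvO (x ++ c :: rest') k + (k.toList.length : Int) - 1) 0 =
            (x.length : Int) := hvk
        rw [hvk']
        rw [if_pos (pv_bguard_of acc _ hacc)]
        rcases eq_or_ne ((x.length : Int)) 0 with hz | hz
        · rw [if_pos hz]
        · rw [if_neg hz]
          exact pv_bb_keep _ (x.length : Int) rest _ rfl hvrest
    · -- the head key does not fire: if found at all, its v must exceed i; recurse
      have hhead : 0 ≤ pvO (x ++ c :: rest') k →
          (x.length : Int) + 1 ≤ pvV (x ++ c :: rest') k := by
        intro ho
        have hge : (x.length : Int) ≤ pvV (x ++ c :: rest') k :=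
          hv (k, dgt) List.mem_cons_self ho
        have hne' : pvV (x ++ c :: rest') k ≠ (x.length : Int) := by
          intro heq
          apply h2
          apply pv_fire_to x rest' c k.toList ho
          have ho' : 0 ≤ PySem.Chars.find (x ++ c :: rest') k.toList := ho
          simp only [pvV, pvO] at heq
          omega
        omega
      rcases ih hvrest with ⟨hnone, hge⟩ | ⟨k', d', hmem, hA, hB⟩
      · left
        constructor
        · simp only [pvAInner]; rw [if_neg h2]; exact hnone
        · intro kv hkv
          rcases List.mem_cons.mp hkv with rfl | hmem
          · exact hhead
          · exact hge kv hmem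
      · right
        refine ⟨k', d', List.mem_cons_of_mem _ hmem, ?_, ?_⟩
        · simp only [pvAInner]; rw [if_neg h2]; exact hA
        · intro acc hacc
          simp only [pvBBest]
          by_cases ho : 0 ≤ pvO (x ++ c :: rest') k
          · rw [if_pos ho]
            have hv1 := hhead ho
            simp only [pvV, pvO] at hv1
            by_cases hg : pvBGuard acc
                (max (PySem.Chars.find (x ++ c :: rest') k.toList + (k.toList.length : Int) - 1) 0) = true
            · rw [if_pos hg]
              rw [if_neg (by omega)]
              apply hB
              intro b hb
              cases hb
              simpa using (by omega : (x.length : Int) <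
                max (PySem.Chars.find (x ++ c :: rest') k.toList + (k.toList.length : Int) - 1) 0)
            · rw [if_neg hg]
              exact hB acc hacc
          · rw [if_neg ho]
            exact hB acc hacc

-- a character of the scanned part lies in every long-enough take
theorem pv_mem_take (x rest' : List Char) (c : Char) (m : Nat) (hm : x.length + 1 ≤ m) :
    c ∈ List.take m (x ++ c :: rest') := by
  rw [List.take_append, List.take_of_length_le (by omega)]
  have h1 : m - x.length = (m - x.length - 1) + 1 := by omega
  rw [h1, List.take_succ_cons]
  exact List.mem_append_right _ List.mem_cons_self

-- main loop invariant: the two programs agree while no key's first occurrence is fully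
-- visible in the digit-free scanned prefix x
theorem pv_outer (line : String) (tmap : List (String × String))
    (hne : ¬ line.toList = []) :
    ∀ (rest x : List Char), line.toList = x ++ rest →
    (∀ kv ∈ tmap, 0 ≤ pvO line.toList kv.1 → (x.length : Int) ≤ pvV line.toList kv.1) →
    (∀ ch ∈ x, PySem.Chars.isdigit ch = false) →
    String.ofList (pvAOuter line.toList tmap x rest) = convert_first_num_to_digit_alt line tmap := by
  intro rest
  induction rest with
  | nil =>
    intro x hline hv _
    rw [List.append_nil] at hline
    have hnofound : ∀ kv ∈ tmap, ¬ 0 ≤ pvO line.toList kv.1 := by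
      intro kv hkv ho
      have hge := hv kv hkv ho
      have hle := pv_occ_le line.toList kv.1.toList ho
      have hxlen : 0 < line.toList.length := List.length_pos_iff.mpr hne
      have hxlen' : x.length = line.toList.length := by rw [hline]
      have ho' : 0 ≤ PySem.Chars.find line.toList kv.1.toList := ho
      simp only [pvV, pvO] at hge
      omega
    unfold convert_first_num_to_digit_alt
    rw [if_neg hne, pv_bb_nofound _ _ _ hnofound]
    simp [pvAOuter, String.ofList_toList]
  | cons c rest' ih =>
    intro x hline hv hx
    simp only [pvAOuter]
    by_cases hd : PySem.Chars.isdigit c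
    · rw [if_pos hd]
      unfold convert_first_num_to_digit_alt
      rw [if_neg hne]
      cases hbb : pvBBest line.toList tmap none with
      | none => dsimp only; exact String.ofList_toList
      | some b =>
        have hbge : (x.length : Int) ≤ b.1 :=
          pv_bb_ge line.toList (x.length : Int) tmap none hv (by intro b h; cases h) b hbb
        obtain ⟨v, o, k, dgt⟩ := b
        dsimp only at hbge ⊢
        rw [PySem.List.slice_to _ (by omega)]
        have hdig : (List.take (v + 1).toNat line.toList).any PySem.Chars.isdigit = true := by
          rw [List.any_eq_true]
          refine ⟨c, ?_, hd⟩
          rw [hline]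
          exact pv_mem_take x rest' c _ (by omega)
        rw [hdig]
        simp [String.ofList_toList]
    · rw [if_neg hd]
      rw [hline]
      have hv' : ∀ kv ∈ tmap, 0 ≤ pvO (x ++ c :: rest') kv.1 →
          (x.length : Int) ≤ pvV (x ++ c :: rest') kv.1 := by
        rw [← hline]; exact hv
      rcases pv_match x rest' c tmap hv' with ⟨hnone, hge⟩ | ⟨k, dgt, hmem, hA, hB⟩
      · rw [hnone, ← hline]
        apply ih (x ++ [c])
        · rw [hline]; simp
        · intro kv hkv ho
          rw [hline] at ho
          have hg := hge kv hkv ho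
          rw [← hline] at hg
          rw [List.length_append, List.length_cons, List.length_nil]
          push_cast
          omega
        · intro ch hch
          rcases List.mem_append.mp hch with h | h
          · exact hx ch h
          · rw [List.mem_singleton.mp h]
            exact Bool.eq_false_iff.mpr hd
      · rw [hA]
        unfold convert_first_num_to_digit_alt
        rw [if_neg hne, hline, hB none (by intro b h; cases h)]
        dsimp only
        have htake : PySem.List.slice (x ++ c :: rest') none (some ((x.length : Int) + 1)) =
            x ++ [c] := by
          rw [PySem.List.slice_to _ (by omega)]
          have h0 : ((x.length : Int) + 1).toNat = x.length + 1 := by omega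
          rw [h0, List.take_append, List.take_of_length_le (by omega)]
          have h1 : x.length + 1 - x.length = 1 := by omega
          rw [h1]
          rfl
        rw [htake]
        have hnod : (x ++ [c]).any PySem.Chars.isdigit = false := by
          rw [List.any_eq_false]
          intro ch hch
          rcases List.mem_append.mp hch with h | h
          · simp [hx ch h]
          · rw [List.mem_singleton.mp h]; simpa using hd
        rw [hnod]
        simp

-- ===== VERDICT (by name: the statement is the Claim_ definition above) =====
theorem convert_first_num_to_digit_spec : Claim_equal_convert_first_num_to_digit := by
  intro line tmap _
  unfold Spec_convert_first_num_to_digit convert_first_num_to_digit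
  by_cases hne : line.toList = []
  · unfold convert_first_num_to_digit_alt
    rw [if_pos hne, hne]
    simp only [pvAOuter]
    rw [← hne]
    exact String.ofList_toList
  · have h := pv_outer line tmap hne line.toList [] (by simp)
      (by
        intro kv _ _
        simp only [pvV, List.length_nil, Nat.cast_zero]
        exact le_max_right _ _)
      (by intro ch h; cases h)
    simpa using h
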